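-- pv_equiv track=rewrite | github.com/prateekgandhi718/regmar | backend/scripts/prelabel_classifier_data.py | prelabel_email
-- ===== SOURCE A (Python) =====
-- TXN_KEYWORDS = {
--     'debited', 'debit', 'credited', 'credit', 'transferred', 'transfer',
--     'amount', 'transaction', 'payment', 'paid', 'spent', 'received', 'deposit',
--     'upi', 'neft', 'rtgs', 'merchant', 'vpa', 'reference number', 'reference no', 'txn ref', 'ref no',
-- }
--
-- NON_TXN_KEYWORDS = {
--     'balance', 'available balance', 'current balance',
--     'limit', 'credit limit', 'available limit',
--     'rate', 'interest rate', 'apr',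
--     'card', 'account number', 'customer care',
--     'issue', 'problem', 'issue resolved',
--     'reward', 'cashback', 'bonus', 'promotion',
--     'statement', 'monthly statement',
-- }
--
-- def prelabel_email(email_body: str) -> int:
--     """
--     Heuristic labeling: return 1 for transaction, 0 for non-transaction.
--     this is unreliable so make sure to check manually after this creates the labels.
--     """
--     body_lower = email_body.lower()
--
--     txn_count = sum(1 for kw in TXN_KEYWORDS if kw in body_lower)
--     non_txn_count = sum(1 for kw in NON_TXN_KEYWORDS if kw in body_lower)
--
--     # If transaction keywords outnumber non-transaction keywords, label as 1
--     if txn_count > non_txn_count: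
--         return 1
--     elif non_txn_count > txn_count:
--         return 0
--     else:
--         # Default: if unsure, assume transaction (1)
--         return 1
-- ===== SOURCE B (Python) =====
-- # B: a position-driven multi-pattern scan. Instead of testing each keyword
-- # against the whole body, sweep the lowered text once left to right; at each
-- # position look up the keywords bucketed by first character and match them as
-- # prefixes starting there, collecting the set of keywords that occur anywhere;
-- # then compare the transaction/non-transaction hit counts (tie -> 1).
-- _TXN_KEYWORDS = (
--     'debited', 'debit', 'credited', 'credit', 'transferred', 'transfer',
--     'amount', 'transaction', 'payment', 'paid', 'spent', 'received', 'deposit',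
--     'upi', 'neft', 'rtgs', 'merchant', 'vpa', 'reference number',
--     'reference no', 'txn ref', 'ref no',
-- )
--
-- _NON_TXN_KEYWORDS = (
--     'balance', 'available balance', 'current balance',
--     'limit', 'credit limit', 'available limit',
--     'rate', 'interest rate', 'apr',
--     'card', 'account number', 'customer care',
--     'issue', 'problem', 'issue resolved',
--     'reward', 'cashback', 'bonus', 'promotion',
--     'statement', 'monthly statement',
-- )
--
-- _ALL_KEYWORDS = _TXN_KEYWORDS + _NON_TXN_KEYWORDS
--
-- # keywords bucketed by their first character
-- _BUCKETS = {}
-- for _kw in _ALL_KEYWORDS: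
--     _BUCKETS[_kw[0]] = _BUCKETS.get(_kw[0], ()) + (_kw,)
--
--
-- def prelabel_email(email_body: str) -> int:
--     body = email_body.lower()
--     found = set()
--     for i in range(len(body)):
--         for kw in _BUCKETS.get(body[i], ()):
--             if kw not in found and body.startswith(kw, i):
--                 found.add(kw)
--     txn_hits = sum(1 for kw in _TXN_KEYWORDS if kw in found)
--     non_hits = sum(1 for kw in _NON_TXN_KEYWORDS if kw in found)
--     return 1 if txn_hits >= non_hits else 0
-- ===== Notes on version B (the rewrite author's own statement) =====
-- stated objective: alternative
-- what changed: Replaces A's per-keyword whole-body substring tests and two counts with a three-way branch by a single left-to-right sweep over the text that, at each position, matches the keywords bucketed by first character as prefixes starting there into a found-set, then one threshold comparison of the hit counts.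
import Mathlib
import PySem

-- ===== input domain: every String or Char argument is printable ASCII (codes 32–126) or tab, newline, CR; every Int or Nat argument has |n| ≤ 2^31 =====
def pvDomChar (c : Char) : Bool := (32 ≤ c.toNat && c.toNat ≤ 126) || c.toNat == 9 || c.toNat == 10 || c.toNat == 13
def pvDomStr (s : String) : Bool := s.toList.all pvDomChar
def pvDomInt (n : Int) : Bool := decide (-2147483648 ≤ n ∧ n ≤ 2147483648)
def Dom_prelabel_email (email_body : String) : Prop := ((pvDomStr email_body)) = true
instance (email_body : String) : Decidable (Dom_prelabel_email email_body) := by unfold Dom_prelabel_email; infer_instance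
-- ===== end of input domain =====

-- B replaces A's per-keyword substring tests by one left-to-right sweep over the text,
-- matching the keywords bucketed by first character as prefixes at each position into a found-set.

-- ===== PORT A =====
-- A's set literals ported as lists of their distinct elements; only counts are taken, so order is irrelevant.
def pvTxnKeywords : List String :=
  ["debited", "debit", "credited", "credit", "transferred", "transfer",
   "amount", "transaction", "payment", "paid", "spent", "received", "deposit",
   "upi", "neft", "rtgs", "merchant", "vpa", "reference number", "reference no", "txn ref", "ref no"]

def pvNonTxnKeywords : List String :=
  ["balance", "available balance", "current balance",
   "limit", "credit limit", "available limit",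
   "rate", "interest rate", "apr",
   "card", "account number", "customer care",
   "issue", "problem", "issue resolved",
   "reward", "cashback", "bonus", "promotion",
   "statement", "monthly statement"]

def prelabel_email (email_body : String) : Int :=
  let body_lower := PySem.Str.lower email_body
  let txn_count : Int := (pvTxnKeywords.countP (fun kw => PySem.Str.isIn kw body_lower) : Int)
  let non_txn_count : Int := (pvNonTxnKeywords.countP (fun kw => PySem.Str.isIn kw body_lower) : Int)
  if txn_count > non_txn_count then 1
  else if non_txn_count > txn_count then 0
  else 1

-- ===== PORT B =====
def pvAllKeywords : List String := pvTxnKeywords ++ pvNonTxnKeywords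

-- Source B's module-level bucket build: _BUCKETS[kw[0]] = _BUCKETS.get(kw[0], ()) + (kw,).
-- kw[0] is ported as kw.toList.headD ' ': exact, since every keyword is a nonempty literal.
def pvBuckets : PySem.Dict Char (List String) :=
  pvAllKeywords.foldl
    (fun d kw =>
      d.insert (kw.toList.headD ' ') (PySem.Dict.getD d (kw.toList.headD ' ') [] ++ [kw]))
    PySem.Dict.empty

-- body.startswith(kw, i) with 0 ≤ i ≤ len(body) is ported as startswith on the dropped suffix (exact there).
def prelabel_email_alt (email_body : String) : Int :=
  let body := (PySem.Str.lower email_body).toList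
  let found : PySem.Set String :=
    (List.range body.length).foldl
      (fun (fs : PySem.Set String) (i : Nat) =>
        (PySem.Dict.getD pvBuckets (PySem.List.pyGetD body (i : Int) ' ') []).foldl
          (fun fs kw =>
            if ¬ PySem.Set.contains fs kw = true ∧ PySem.Chars.startswith (body.drop i) kw.toList = true
            then PySem.Set.add fs kw else fs)
          fs)
      PySem.Set.empty
  let txn_hits : Int := (pvTxnKeywords.countP (fun kw => PySem.Set.contains found kw) : Int)
  let non_hits : Int := (pvNonTxnKeywords.countP (fun kw => PySem.Set.contains found kw) : Int)
  if txn_hits ≥ non_hits then 1 else 0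

-- ===== PRECONDITION & SPEC =====
def Spec_prelabel_email (email_body : String) (out : Int) : Prop := out = prelabel_email_alt email_body
instance (email_body : String) (out : Int) : Decidable (Spec_prelabel_email email_body out) := by unfold Spec_prelabel_email; infer_instance

-- ===== CLAIM (what is proved, stated in full; the proofs are below) =====
def Claim_equal_prelabel_email : Prop := ∀ (email_body : String), Dom_prelabel_email email_body → Spec_prelabel_email email_body (prelabel_email email_body)

-- ===== LEMMAS AND PROOFS =====

-- Membership after the inner fold over one bucket: old members, plus bucket keywords prefixing this suffix.
theorem pv_mem_foldkw (suffix : List Char) (ks : List String) (fs : PySem.Set String) (y : String) :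
    y ∈ ks.foldl
        (fun fs kw =>
          if ¬ PySem.Set.contains fs kw = true ∧ PySem.Chars.startswith suffix kw.toList = true
          then PySem.Set.add fs kw else fs)
        fs ↔
      y ∈ fs ∨ (y ∈ ks ∧ PySem.Chars.startswith suffix y.toList = true) := by
  induction ks generalizing fs with
  | nil => simp
  | cons k t ih =>
    simp only [List.foldl_cons, ih, List.mem_cons]
    by_cases hc : PySem.Set.contains fs k = true
    · have hk : k ∈ fs := (PySem.Set.contains_iff fs k).mp hc
      rw [if_neg (fun h => h.1 hc)]
      constructor
      · rintro (h | ⟨h1, h2⟩)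
        · exact Or.inl h
        · exact Or.inr ⟨Or.inr h1, h2⟩
      · rintro (h | ⟨rfl | h1, h2⟩)
        · exact Or.inl h
        · exact Or.inl hk
        · exact Or.inr ⟨h1, h2⟩
    · by_cases hp : PySem.Chars.startswith suffix k.toList = true
      · rw [if_pos ⟨hc, hp⟩]
        simp only [PySem.Set.mem_add]
        constructor
        · rintro ((h | rfl) | ⟨h1, h2⟩)
          · exact Or.inl h
          · exact Or.inr ⟨Or.inl rfl, hp⟩
          · exact Or.inr ⟨Or.inr h1, h2⟩
        · rintro (h | ⟨rfl | h1, h2⟩)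
          · exact Or.inl (Or.inl h)
          · exact Or.inl (Or.inr rfl)
          · exact Or.inr ⟨h1, h2⟩
      · rw [if_neg (fun h => hp h.2)]
        constructor
        · rintro (h | ⟨h1, h2⟩)
          · exact Or.inl h
          · exact Or.inr ⟨Or.inr h1, h2⟩
        · rintro (h | ⟨rfl | h1, h2⟩)
          · exact Or.inl h
          · exact (hp h2).elim
          · exact Or.inr ⟨h1, h2⟩

-- Membership after the whole sweep over a list of positions.
theorem pv_mem_sweep (body : List Char) (l : List Nat) (fs : PySem.Set String) (y : String) :
    y ∈ l.foldl
        (fun (fs : PySem.Set String) (i : Nat) =>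
          (PySem.Dict.getD pvBuckets (PySem.List.pyGetD body (i : Int) ' ') []).foldl
            (fun fs kw =>
              if ¬ PySem.Set.contains fs kw = true ∧ PySem.Chars.startswith (body.drop i) kw.toList = true
              then PySem.Set.add fs kw else fs)
            fs)
        fs ↔
      y ∈ fs ∨ ∃ i ∈ l, y ∈ PySem.Dict.getD pvBuckets (PySem.List.pyGetD body (i : Int) ' ') [] ∧
        PySem.Chars.startswith (body.drop i) y.toList = true := by
  induction l generalizing fs with
  | nil => simp
  | cons i t ih =>
    simp only [List.foldl_cons, ih, pv_mem_foldkw, List.mem_cons]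
    constructor
    · rintro ((h | ⟨h1, h2⟩) | ⟨j, hj, h1, h2⟩)
      · exact Or.inl h
      · exact Or.inr ⟨i, Or.inl rfl, h1, h2⟩
      · exact Or.inr ⟨j, Or.inr hj, h1, h2⟩
    · rintro (h | ⟨j, (rfl | hj), h1, h2⟩)
      · exact Or.inl (Or.inl h)
      · exact Or.inl (Or.inr ⟨h1, h2⟩)
      · exact Or.inr ⟨j, hj, h1, h2⟩

-- Per-keyword facts of the concrete tables: every keyword is nonempty and sits in its first-character bucket.
set_option maxRecDepth 8192 in
theorem pv_kw_facts : ∀ kw ∈ pvAllKeywords,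
    kw.toList ≠ [] ∧ kw ∈ PySem.Dict.getD pvBuckets (kw.toList.headD ' ') [] := by decide

-- A keyword of the tables is found by the sweep iff it is a substring of the body.
theorem pv_found_iff_isIn (body : List Char) (kw : String) (hkw : kw ∈ pvAllKeywords) :
    kw ∈ (List.range body.length).foldl
            (fun (fs : PySem.Set String) (i : Nat) =>
              (PySem.Dict.getD pvBuckets (PySem.List.pyGetD body (i : Int) ' ') []).foldl
                (fun fs kw =>
                  if ¬ PySem.Set.contains fs kw = true ∧ PySem.Chars.startswith (body.drop i) kw.toList = true
                  then PySem.Set.add fs kw else fs)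
                fs)
            PySem.Set.empty
      ↔ PySem.Chars.isIn kw.toList body = true := by
  obtain ⟨hne, hbucket⟩ := pv_kw_facts kw hkw
  rw [pv_mem_sweep, ← PySem.Chars.exists_prefix_drop_iff_isIn]
  constructor
  · rintro (h | ⟨i, -, -, h2⟩)
    · simp [PySem.Set.empty] at h
    · exact ⟨i, (PySem.Chars.startswith_iff _ _).mp h2⟩
  · rintro ⟨j, hj⟩
    have hjlen : j < body.length := by
      by_contra h
      rw [List.drop_eq_nil_of_le (by omega)] at hj
      exact hne (List.prefix_nil.mp hj)
    have hget : PySem.List.pyGetD body (j : Int) ' ' = kw.toList.headD ' ' := by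
      obtain ⟨t, ht⟩ := hj
      obtain ⟨c, cs, hcons⟩ := List.exists_cons_of_ne_nil hne
      have h2 : (List.drop j body)[0]? = body[j]? := by
        rw [List.getElem?_drop]
        norm_num
      rw [← ht, hcons] at h2
      rw [PySem.List.pyGetD_natCast, List.getD_eq_getElem?_getD, hcons]
      have h3 : body[j]? = some c := by simpa using h2.symm
      simp [h3]
    exact Or.inr ⟨j, List.mem_range.mpr hjlen,
      hget ▸ hbucket, (PySem.Chars.startswith_iff _ _).mpr hj⟩

-- For every keyword of either list, the sweep's found-set test agrees with A's substring test.
theorem pv_count_agree (body : List Char) (ks : List String) (hks : ∀ k ∈ ks, k ∈ pvAllKeywords) :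
    ks.countP (fun kw => PySem.Set.contains
        ((List.range body.length).foldl
          (fun (fs : PySem.Set String) (i : Nat) =>
            (PySem.Dict.getD pvBuckets (PySem.List.pyGetD body (i : Int) ' ') []).foldl
              (fun fs kw =>
                if ¬ PySem.Set.contains fs kw = true ∧ PySem.Chars.startswith (body.drop i) kw.toList = true
                then PySem.Set.add fs kw else fs)
              fs)
          PySem.Set.empty) kw)
      = ks.countP (fun kw => PySem.Chars.isIn kw.toList body) := by
  apply List.countP_congr
  intro k hk
  have h := pv_found_iff_isIn body k (hks k hk)
  rw [← PySem.Set.contains_iff] at h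
  by_cases hc : PySem.Chars.isIn k.toList body = true <;> simp [hc] at h ⊢ <;> simp [h]

-- ===== VERDICT (by name: the statement is the Claim_ definition above) =====
theorem prelabel_email_spec : Claim_equal_prelabel_email := by
  intro email_body _
  unfold Spec_prelabel_email prelabel_email prelabel_email_alt
  simp only [PySem.Str.isIn]
  rw [pv_count_agree _ _ (fun k hk => by unfold pvAllKeywords; exact List.mem_append_left _ hk),
      pv_count_agree _ _ (fun k hk => by unfold pvAllKeywords; exact List.mem_append_right _ hk)]
  split_ifs <;> omega
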